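-- pv_equiv track=rewrite | github.com/pypi-data/pypi-mirror-354 | packages/nonebot-plugin-ciku/nonebot_plugin_ciku-0.2.4.tar.gz/nonebot_plugin_ciku-0.2.4/nonebot_plugin_ciku/ciku/basic_method.py | split_formulas
-- ===== SOURCE A (Python) =====
-- def split_formulas(s):
--     """将连续表达式分割为独立算式"""
--     result = []
--     start = 0
--     depth = 0
--     for i, c in enumerate(s):
--         if c == '[':
--             depth += 1
--         elif c == ']':
--             depth -= 1
--             if depth == 0:
--                 result.append(s[start:i+1])
--                 start = i + 1
--     if depth != 0:
--         raise ValueError(f"括号未闭合: {s}")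
--     return result
-- ===== SOURCE B (Python) =====
-- def split_formulas(s):
--     """将连续表达式分割为独立算式"""
--     out = []
--     rest = s
--     while True:
--         j = next((i for i, c in enumerate(rest)
--                   if c == ']' and rest[:i+1].count('[') == rest[:i+1].count(']')), None)
--         if j is None:
--             break
--         out.append(rest[:j+1])
--         rest = rest[j+1:]
--     if rest.count('[') != rest.count(']'):
--         raise ValueError(f"括号未闭合: {s}")
--     return out
-- ===== Notes on version B (the rewrite author's own statement) =====
-- stated objective: alternative
-- what changed: A makes one stateful scan with a running bracket depth and a start cursor; B has no depth counter at all: it repeatedly searches the remaining suffix for the first ']' whose prefix has equally many '[' and ']' (a count comparison on the slice), cuts that prefix off as a segment, and restarts on the remainder.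
import Mathlib
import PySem

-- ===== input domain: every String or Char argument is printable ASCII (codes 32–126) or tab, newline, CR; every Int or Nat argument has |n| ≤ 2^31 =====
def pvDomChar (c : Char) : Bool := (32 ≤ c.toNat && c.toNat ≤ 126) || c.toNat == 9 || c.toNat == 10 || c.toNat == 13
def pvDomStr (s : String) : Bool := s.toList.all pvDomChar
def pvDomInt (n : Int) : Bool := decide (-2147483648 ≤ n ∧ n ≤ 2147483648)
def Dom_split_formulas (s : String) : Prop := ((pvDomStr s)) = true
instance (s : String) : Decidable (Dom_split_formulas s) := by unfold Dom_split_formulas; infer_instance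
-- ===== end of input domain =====

-- B drops A's running depth counter and start cursor: it repeatedly finds, in the remaining
-- suffix, the first ']' whose prefix holds equally many '[' and ']' (a count comparison),
-- cuts that prefix off, and restarts on the rest; same results, different algorithm, not faster.

-- ===== PORT A =====
-- A's loop body as a helper; state is (result, start, depth), cs is the full character list being sliced.
def splitStepA (cs : List Char) (st : List String × Int × Int) (ic : Int × Char) : List String × Int × Int :=
  let (result, start, depth) := st
  let (i, c) := ic
  if c = '[' then (result, start, depth + 1)
  else if c = ']' then
    let depth := depth - 1
    if depth = 0 then
      (result ++ [String.ofList (PySem.List.slice cs (some start) (some (i + 1)))], i + 1, depth)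
    else (result, start, depth)
  else (result, start, depth)

-- A raises ValueError when the final depth ≠ 0; those inputs are excluded by Pre_ below, the port
-- returns the accumulated result there.
def split_formulas (s : String) : List String :=
  let cs := s.toList
  ((PySem.List.enumerate cs 0).foldl (splitStepA cs) ([], 0, 0)).1

-- ===== PORT B =====
-- B's inner generator: first index i (from position j on) with rest[i] = ']' and
-- rest[:i+1].count('[') == rest[:i+1].count(']'); prefix slices are List.take, exact for i+1 ≥ 0.
-- The fuel argument only totalizes the index loop (cs.length - j steps remain); it never changes a result.
def pvFindFuel (cs : List Char) : Nat → Nat → Option Nat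
  | _, 0 => none
  | j, f+1 =>
    if h : j < cs.length then
      if cs[j] = ']' ∧ (cs.take (j+1)).count '[' = (cs.take (j+1)).count ']' then some j
      else pvFindFuel cs (j+1) f
    else none

def pvFindAux (cs : List Char) (j : Nat) : Option Nat := pvFindFuel cs j (cs.length - j)

-- B's while loop: accumulate the cut-off prefix, continue on the remaining suffix.
-- Fuel (one more than the suffix length) only totalizes the loop; each iteration consumes ≥ 1 char.
def pvAltGo : Nat → List String → List Char → List String
  | 0, acc, _ => acc
  | f+1, acc, rest =>
    match pvFindAux rest 0 with
    | none => acc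
    | some j => pvAltGo f (acc ++ [String.ofList (rest.take (j+1))]) (rest.drop (j+1))

-- B raises ValueError when the remaining suffix is unbalanced; those inputs are excluded by Pre_,
-- the port returns the accumulated list there.
def split_formulas_alt (s : String) : List String := pvAltGo (s.toList.length + 1) [] s.toList

-- ===== PRECONDITION & SPEC =====
-- Pre_ excludes exactly the inputs with unbalanced brackets, on which Python A (and B) raise ValueError.
def Pre_split_formulas (s : String) : Prop := s.toList.count '[' = s.toList.count ']'
instance (s : String) : Decidable (Pre_split_formulas s) := by unfold Pre_split_formulas; infer_instance
def pvWitness_split_formulas : String := "[1+2]xx[3]yy"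

def Spec_split_formulas (s : String) (out : List String) : Prop := out = split_formulas_alt s
instance (s : String) (out : List String) : Decidable (Spec_split_formulas s out) := by unfold Spec_split_formulas; infer_instance

-- ===== CLAIM (what is proved, stated in full; the proofs are below) =====
def Claim_equal_split_formulas : Prop := ∀ (s : String), Dom_split_formulas s → Pre_split_formulas s → Spec_split_formulas s (split_formulas s)

-- ===== LEMMAS AND PROOFS =====

-- boundary positions: k is the index of the first char of l in the full string, d the depth before it
def pvBnds (k d : Int) : List Char → List Int
  | [] => []
  | c :: cs =>
    let d' := if c = '[' then d + 1 else if c = ']' then d - 1 else d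
    if c = ']' ∧ d' = 0 then (k + 1) :: pvBnds (k + 1) d' cs else pvBnds (k + 1) d' cs

-- slices of cs between consecutive boundaries, starting at `start`
def pvSegs (cs : List Char) (start : Int) : List Int → List String
  | [] => []
  | b :: bs => String.ofList (PySem.List.slice cs (some start) (some b)) :: pvSegs cs b bs

-- depth-carrying reformulation of B's find
def pvFindD (d : Int) : List Char → Option Nat
  | [] => none
  | c :: cs =>
    let d' := if c = '[' then d + 1 else if c = ']' then d - 1 else d
    if c = ']' ∧ d' = 0 then some 0 else (pvFindD d' cs).map (· + 1)

-- prefix balance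
def pvBal (l : List Char) : Int := (l.count '[' : Int) - (l.count ']' : Int)

lemma pvFoldA (cs : List Char) (l : List Char) (k : Int) (res : List String) (start d : Int) :
    ((PySem.List.enumerate l k).foldl (splitStepA cs) (res, start, d)).1
      = res ++ pvSegs cs start (pvBnds k d l) := by
  induction l generalizing k res start d with
  | nil => simp [PySem.List.enumerate_nil, pvBnds, pvSegs]
  | cons c cs' ih =>
    rw [PySem.List.enumerate_cons, List.foldl_cons]
    by_cases h1 : c = '['
    · simp [splitStepA, pvBnds, h1, ih]
    · by_cases h2 : c = ']'
      · by_cases h3 : d - 1 = 0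
        · simp [splitStepA, pvBnds, h2, h3, ih, pvSegs]
        · simp [splitStepA, pvBnds, h2, h3, ih]
      · simp [splitStepA, pvBnds, h1, h2, ih]

lemma pvFindD_lt (d : Int) (l : List Char) (i : Nat) (h : pvFindD d l = some i) : i < l.length := by
  induction l generalizing d i with
  | nil => simp [pvFindD] at h
  | cons c cs ih =>
    rw [pvFindD] at h
    by_cases hc : c = ']' ∧ (if c = '[' then d + 1 else if c = ']' then d - 1 else d) = 0
    · rw [if_pos hc] at h; cases h; simp
    · rw [if_neg hc] at h
      rcases Option.map_eq_some_iff.mp h with ⟨j, hj, hji⟩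
      have := ih _ _ hj; simp; omega

lemma pvBal_take_succ (cs : List Char) (j : Nat) (hj : j < cs.length) :
    pvBal (cs.take (j+1))
      = pvBal (cs.take j) + (if cs[j] = '[' then 1 else if cs[j] = ']' then -1 else 0) := by
  have ht : cs.take (j+1) = cs.take j ++ [cs[j]] := by
    rw [List.take_add_one, List.getElem?_eq_getElem hj]; rfl
  have c1 : ∀ (a c : Char), List.count a [c] = if c = a then 1 else 0 := by
    intro a c; by_cases h : c = a <;> simp [h]
  rw [ht]
  unfold pvBal
  rw [List.count_append, List.count_append, c1, c1]
  by_cases h1 : cs[j] = '['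
  · have h2 : ¬ cs[j] = ']' := by rw [h1]; decide
    simp only [h1, if_true]
    push_cast; ring
  · by_cases h2 : cs[j] = ']'
    · simp only [h2, if_true, if_neg h1]
      push_cast; ring
    · simp only [if_neg h1, if_neg h2]
      push_cast; ring

lemma pvFindFuel_eq (cs : List Char) (f j : Nat) (hf : cs.length - j ≤ f) (hj : j ≤ cs.length) :
    pvFindFuel cs j f = (pvFindD (pvBal (cs.take j)) (cs.drop j)).map (· + j) := by
  induction f generalizing j with
  | zero =>
    have hj' : j = cs.length := by omega
    rw [pvFindFuel, hj', List.drop_length]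
    simp [pvFindD]
  | succ f ihf =>
    by_cases hlt : j < cs.length
    · have hdrop : cs.drop j = cs[j] :: cs.drop (j+1) := (List.getElem_cons_drop hlt).symm
      have hbal := pvBal_take_succ cs j hlt
      have hcond : ((cs.take (j+1)).count '[' = (cs.take (j+1)).count ']')
          ↔ pvBal (cs.take (j+1)) = 0 := by unfold pvBal; omega
      rw [pvFindFuel, dif_pos hlt, hdrop, pvFindD]
      have hd' : (if cs[j] = '[' then pvBal (cs.take j) + 1
          else if cs[j] = ']' then pvBal (cs.take j) - 1 else pvBal (cs.take j))
          = pvBal (cs.take (j+1)) := by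
        rw [hbal]
        by_cases h1 : cs[j] = '[' <;> by_cases h2 : cs[j] = ']' <;> simp [h1, h2] <;> ring
      rw [hd']
      by_cases hc : cs[j] = ']' ∧ (cs.take (j+1)).count '[' = (cs.take (j+1)).count ']'
      · rw [if_pos hc, if_pos ⟨hc.1, hcond.mp hc.2⟩]
        simp
      · have hc' : ¬ (cs[j] = ']' ∧ pvBal (cs.take (j+1)) = 0) := by
          intro hx; exact hc ⟨hx.1, hcond.mpr hx.2⟩
        rw [if_neg hc, if_neg hc', ihf (j+1) (by omega) (by omega)]
        rw [Option.map_map]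
        congr 1
        funext x
        simp
        omega
    · rw [pvFindFuel, dif_neg hlt]
      have : j = cs.length := by omega
      rw [this, List.drop_length]
      simp [pvFindD]

lemma pvBnds_eq_find (l : List Char) (k d : Int) :
    pvBnds k d l = match pvFindD d l with
      | none => []
      | some i => (k + i + 1) :: pvBnds (k + i + 1) 0 (l.drop (i+1)) := by
  induction l generalizing k d with
  | nil => simp [pvBnds, pvFindD]
  | cons c cs ih =>
    rw [pvBnds, pvFindD]
    by_cases hc : c = ']' ∧ (if c = '[' then d + 1 else if c = ']' then d - 1 else d) = 0
    · rw [if_pos hc, if_pos hc]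
      simp only [hc.2]
      norm_num
    · rw [if_neg hc, if_neg hc, ih]
      cases hE : pvFindD (if c = '[' then d + 1 else if c = ']' then d - 1 else d) cs with
      | none => simp
      | some i =>
        simp only [Option.map_some]
        have h1 : (k + 1 + (i : Int) + 1) = k + ((i : Nat) + 1 : Nat) + 1 := by push_cast; ring
        simp only [List.drop_succ_cons]
        rw [h1]

lemma pvFindAux_zero (l : List Char) : pvFindAux l 0 = pvFindD 0 l := by
  unfold pvFindAux
  rw [pvFindFuel_eq l (l.length - 0) 0 le_rfl (by omega)]
  simp [pvBal]

lemma pvMain (f : Nat) (l cs : List Char) (m : Nat) (acc : List String)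
    (hf : l.length < f) (hl : cs.drop m = l) :
    pvAltGo f acc l = acc ++ pvSegs cs (m : Int) (pvBnds (m : Int) 0 l) := by
  induction f generalizing l m acc with
  | zero => omega
  | succ f ih =>
    rw [pvAltGo, pvFindAux_zero]
    cases hE : pvFindD 0 l with
    | none =>
      rw [pvBnds_eq_find, hE]
      simp [pvSegs]
    | some i =>
      have hi : i < l.length := pvFindD_lt _ _ _ hE
      rw [pvBnds_eq_find, hE]
      have hcast : ((m : Int) + (i : Int) + 1) = ((m + i + 1 : Nat) : Int) := by push_cast; ring
      simp only [pvSegs]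
      rw [hcast]
      rw [PySem.List.slice_natCast]
      have hslice : (cs.drop m).take (m + i + 1 - m) = l.take (i+1) := by
        rw [hl]; congr 1; omega
      rw [hslice]
      rw [ih (l.drop (i+1)) (m + i + 1) (acc ++ [String.ofList (l.take (i+1))])
        (by simp; omega)
        (by rw [← hl, List.drop_drop]; congr 1)]
      simp

-- ===== VERDICT (by name: the statement is the Claim_ definition above) =====
theorem split_formulas_spec : Claim_equal_split_formulas := by
  intro s _ _
  unfold Spec_split_formulas
  simp only [split_formulas, split_formulas_alt]
  rw [pvFoldA]
  rw [pvMain (s.toList.length + 1) s.toList s.toList 0 [] (by omega) (by simp)]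
  simp
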